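-- pv_equiv track=rewrite | github.com/sparkyfen/tp-7-mtp | reverse_engineering/tp7_probe.py | midi7_encode_simple
-- ===== SOURCE A (Python) =====
-- def midi7_encode_simple(data):
--     """Encode 8-bit data to MIDI 7-bit: [msb_carrier] [d0&0x7F] [d1&0x7F] ... per 7-byte group."""
--     encoded = []
--     for i in range(0, len(data), 7):
--         chunk = data[i:i+7]
--         msb = 0
--         for j, byte in enumerate(chunk):
--             if byte & 0x80:
--                 msb |= (1 << j)
--         encoded.append(msb)
--         encoded.extend([b & 0x7F for b in chunk])
--     return encoded
-- ===== SOURCE B (Python) =====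
-- def midi7_encode_simple(data):
--     """Encode 8-bit data to MIDI 7-bit: [msb_carrier] [d0&0x7F] ... — single flat pass, back-patching the carrier byte."""
--     encoded = []
--     carrier_idx = 0
--     for i, byte in enumerate(data):
--         if i % 7 == 0:
--             carrier_idx = len(encoded)
--             encoded.append(0)
--         if byte & 0x80:
--             encoded[carrier_idx] |= 1 << (i % 7)
--         encoded.append(byte & 0x7F)
--     return encoded
-- ===== Notes on version B (the rewrite author's own statement) =====
-- stated objective: alternative
-- what changed: B replaces A's nested chunk loop (slicing 7-byte chunks and an inner bit-building loop) with one flat pass over enumerate(data) that appends a 0 carrier placeholder at each group start and back-patches its bits in place via i % 7.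
import Mathlib
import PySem

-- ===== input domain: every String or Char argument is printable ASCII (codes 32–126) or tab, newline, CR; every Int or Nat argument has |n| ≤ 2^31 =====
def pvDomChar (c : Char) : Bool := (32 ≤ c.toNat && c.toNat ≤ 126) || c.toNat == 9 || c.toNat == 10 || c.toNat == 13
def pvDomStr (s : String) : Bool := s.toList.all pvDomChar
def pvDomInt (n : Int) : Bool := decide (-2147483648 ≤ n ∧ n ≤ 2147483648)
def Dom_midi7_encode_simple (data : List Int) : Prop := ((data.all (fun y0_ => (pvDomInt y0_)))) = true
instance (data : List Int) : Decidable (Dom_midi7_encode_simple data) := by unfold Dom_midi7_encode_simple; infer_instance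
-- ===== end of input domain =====

-- B is an alternative single-pass formulation of A (same cost): one flat pass that back-patches the carrier byte in place.

-- ===== PORT A =====
-- literal transliteration of A: outer loop over range(0, len(data), 7), slicing a 7-chunk,
-- inner enumerate loop building the msb carrier, then append + extend.
def midi7_encode_simple (data : List Int) : List Int :=
  (PySem.List.pyRange 0 (data.length : Int) 7).foldl
    (fun encoded i =>
      let chunk := PySem.List.slice data (some i) (some (i + 7))
      let msb := (PySem.List.enumerate chunk 0).foldl
        (fun m p => if PySem.Int.band p.2 128 ≠ 0 then PySem.Int.bor m ((1 : Int) <<< p.1.toNat) else m) 0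
      (encoded ++ [msb]) ++ chunk.map (fun b => PySem.Int.band b 127))
    []

-- ===== PORT B =====
-- literal transliteration of B (Source B): one pass over enumerate(data); at i % 7 == 0 record the
-- carrier index and append a 0 placeholder; set its bit in place (the index is always in range —
-- the carrier was just appended — so getD/set are exact here) and append byte & 0x7F.
def midi7_encode_simple_alt (data : List Int) : List Int :=
  ((PySem.List.enumerate data 0).foldl
    (fun (st : List Int × Nat) p =>
      let s1 := if PySem.Int.mod p.1 7 = 0 then (st.1 ++ [(0 : Int)], st.1.length) else st
      let encoded :=
        if PySem.Int.band p.2 128 ≠ 0 then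
          s1.1.set s1.2 (PySem.Int.bor (s1.1.getD s1.2 0) ((1 : Int) <<< (PySem.Int.mod p.1 7).toNat))
        else s1.1
      (encoded ++ [PySem.Int.band p.2 127], s1.2))
    ([], 0)).1

-- ===== PRECONDITION & SPEC =====
def Spec_midi7_encode_simple (data : List Int) (out : List Int) : Prop := out = midi7_encode_simple_alt data
instance (data : List Int) (out : List Int) : Decidable (Spec_midi7_encode_simple data out) := by unfold Spec_midi7_encode_simple; infer_instance

-- ===== CLAIM (what is proved, stated in full; the proofs are below) =====
def Claim_equal_midi7_encode_simple : Prop := ∀ (data : List Int), Dom_midi7_encode_simple data → Spec_midi7_encode_simple data (midi7_encode_simple data)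

-- ===== LEMMAS AND PROOFS =====

-- named forms of the two loop bodies (definitionally equal to the lambdas in the ports)
def chunkA (data : List Int) (i : Int) : List Int := PySem.List.slice data (some i) (some (i + 7))

def msbA (data : List Int) (i : Int) : Int :=
  (PySem.List.enumerate (chunkA data i) 0).foldl
    (fun m p => if PySem.Int.band p.2 128 ≠ 0 then PySem.Int.bor m ((1 : Int) <<< p.1.toNat) else m) 0

def fA (data encoded : List Int) (i : Int) : List Int :=
  (encoded ++ [msbA data i]) ++ (chunkA data i).map (fun b => PySem.Int.band b 127)

def stepB (st : List Int × Nat) (p : Int × Int) : List Int × Nat :=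
  let s1 := if PySem.Int.mod p.1 7 = 0 then (st.1 ++ [(0 : Int)], st.1.length) else st
  let encoded :=
    if PySem.Int.band p.2 128 ≠ 0 then
      s1.1.set s1.2 (PySem.Int.bor (s1.1.getD s1.2 0) ((1 : Int) <<< (PySem.Int.mod p.1 7).toNat))
    else s1.1
  (encoded ++ [PySem.Int.band p.2 127], s1.2)

theorem A_unfold (data : List Int) :
    midi7_encode_simple data = (PySem.List.pyRange 0 (data.length : Int) 7).foldl (fA data) [] := rfl

theorem B_unfold (data : List Int) :
    midi7_encode_simple_alt data = ((PySem.List.enumerate data 0).foldl stepB ([], 0)).1 := rfl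

-- the carrier accumulator of one 7-group: fold the high bits of the chunk into m, from bit j on
def msbAux : List Int → Nat → Int → Int
  | [], _, m => m
  | b :: t, j, m =>
      msbAux t (j + 1) (if PySem.Int.band b 128 ≠ 0 then PySem.Int.bor m ((1 : Int) <<< j) else m)

-- reference shape: the encoded stream, group by group
def groups (data : List Int) : List Int :=
  match data with
  | [] => []
  | b :: t => (msbAux ((b :: t).take 7) 0 0 :: ((b :: t).take 7).map (fun x => PySem.Int.band x 127)) ++ groups (t.drop 6)
termination_by data.length
decreasing_by simp

theorem groups_eq (data : List Int) (h : data ≠ []) :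
    groups data = (msbAux (data.take 7) 0 0 :: (data.take 7).map (fun x => PySem.Int.band x 127)) ++ groups (data.drop 7) := by
  cases data with
  | nil => exact absurd rfl h
  | cons b t => rw [groups]; simp

theorem pyRange7_nonpos (a : Int) (h : a ≤ 0) : PySem.List.pyRange 0 a 7 = [] := by
  rw [PySem.List.pyRange_of_pos 0 a (by norm_num)]
  simp [show ¬ ((0:Int) < a) by omega]

theorem pyRange7_cons (a : Int) (h : 0 < a) :
    PySem.List.pyRange 0 a 7 = 0 :: (PySem.List.pyRange 0 (a - 7) 7).map (· + 7) := by
  rw [PySem.List.pyRange_of_pos 0 a (by norm_num), PySem.List.pyRange_of_pos 0 (a - 7) (by norm_num)]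
  have hm : (if (0:Int) < a then ((a - 0 + 7 - 1) / 7).toNat else 0)
      = (if (0:Int) < a - 7 then ((a - 7 - 0 + 7 - 1) / 7).toNat else 0) + 1 := by
    split_ifs <;> omega
  rw [hm, List.range_succ_eq_map]
  simp [List.map_map, Function.comp]
  intro k _
  ring

-- list surgery for back-patching at the join point of enc ++ m :: ws
theorem getD_append_len (enc ws : List Int) (m : Int) : (enc ++ m :: ws).getD enc.length 0 = m := by
  induction enc with
  | nil => rfl
  | cons x t _ => simp

theorem set_append_len (enc ws : List Int) (m v : Int) : (enc ++ m :: ws).set enc.length v = enc ++ v :: ws := by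
  induction enc with
  | nil => rfl
  | cons x t _ => simp

-- A's inner enumerate loop is msbAux
theorem innerA (chunk : List Int) : ∀ (j : Nat) (m : Int),
    (PySem.List.enumerate chunk (j : Int)).foldl
      (fun m p => if PySem.Int.band p.2 128 ≠ 0 then PySem.Int.bor m ((1 : Int) <<< p.1.toNat) else m) m
    = msbAux chunk j m := by
  induction chunk with
  | nil => intro j m; rfl
  | cons b t ih =>
    intro j m
    rw [PySem.List.enumerate_cons, List.foldl_cons]
    have h1 : ((j : Int) + 1) = ((j + 1 : Nat) : Int) := by push_cast; ring
    rw [h1, ih]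
    simp [msbAux, Int.shiftLeft_natCast_right]

theorem msbA_head (data : List Int) : msbA data 0 = msbAux (chunkA data 0) 0 0 := by
  have := innerA (chunkA data 0) 0 0
  simpa [msbA] using this

-- slicing the (k+7)-chunk of data is slicing the k-chunk of data.drop 7
theorem chunkA_shift (xs : List Int) (k : Nat) :
    chunkA xs ((k : Int) + 7) = chunkA (xs.drop 7) (k : Int) := by
  unfold chunkA
  rw [show ((k : Int) + 7 + 7) = (((k + 14 : Nat) : Int)) by push_cast; ring,
      show ((k : Int) + 7) = (((k + 7 : Nat) : Int)) by push_cast; ring,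
      PySem.List.slice_natCast,
      show ((k : Int)) = (((k : Nat) : Int)) from rfl]
  rw [PySem.List.slice_natCast, List.drop_drop]
  rw [show k + 14 - (k + 7) = 7 from by omega, show (k : Nat) + 7 - k = 7 from by omega,
      show k + 7 = 7 + k from by omega]

theorem chunkA_head (xs : List Int) : chunkA xs 0 = xs.take 7 := by
  unfold chunkA
  rw [show ((0 : Int) + 7) = (((7 : Nat) : Int)) by norm_num]
  rw [PySem.List.slice_zero_start, PySem.List.slice_to_natCast]

theorem fA_shift (data acc : List Int) (k : Nat) :
    fA data acc ((k : Int) + 7) = fA (data.drop 7) acc (k : Int) := by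
  unfold fA msbA
  rw [chunkA_shift]

-- ===== A equals groups =====
theorem A_main : ∀ (n : Nat) (data : List Int), data.length = n → ∀ (enc : List Int),
    (PySem.List.pyRange 0 (data.length : Int) 7).foldl (fA data) enc = enc ++ groups data := by
  intro n
  induction n using Nat.strong_induction_on with
  | _ n ih =>
    intro data hlen enc
    cases data with
    | nil => simp [pyRange7_nonpos 0 le_rfl, groups]
    | cons b t =>
      have hpos : (0:Int) < (((b :: t).length : Nat) : Int) := by
        simp
      rw [pyRange7_cons _ hpos, List.foldl_cons, List.foldl_map]
      have hhead : fA (b :: t) enc 0 = enc ++ (msbAux ((b :: t).take 7) 0 0 :: ((b :: t).take 7).map (fun x => PySem.Int.band x 127)) := by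
        rw [fA, msbA_head, chunkA_head]
        simp
      rw [hhead]
      have hcong : (PySem.List.pyRange 0 ((((b :: t).length : Nat) : Int) - 7) 7).foldl
            (fun acc i => fA (b :: t) acc (i + 7)) (enc ++ (msbAux ((b :: t).take 7) 0 0 :: ((b :: t).take 7).map (fun x => PySem.Int.band x 127)))
          = (PySem.List.pyRange 0 ((((b :: t).length : Nat) : Int) - 7) 7).foldl
            (fA ((b :: t).drop 7)) (enc ++ (msbAux ((b :: t).take 7) 0 0 :: ((b :: t).take 7).map (fun x => PySem.Int.band x 127))) := by
        apply PySem.List.foldl_congr_mem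
        intro acc i hi
        have h0 : 0 ≤ i := ((PySem.List.mem_pyRange_iff_of_pos (by norm_num) i).mp hi).1
        have : i = ((i.toNat : Nat) : Int) := by omega
        rw [this, fA_shift]
      rw [hcong]
      have hrange : PySem.List.pyRange 0 ((((b :: t).length : Nat) : Int) - 7) 7
          = PySem.List.pyRange 0 ((((b :: t).drop 7).length : Nat) : Int) 7 := by
        by_cases h7 : 7 ≤ (b :: t).length
        · congr 1
          simp only [List.length_cons, List.length_drop] at h7 ⊢
          omega
        · simp only [List.length_cons, List.length_drop] at h7 ⊢
          rw [pyRange7_nonpos _ (by omega), pyRange7_nonpos _ (by omega)]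
      rw [hrange, ih ((b :: t).drop 7).length (by simp only [List.length_cons, List.length_drop] at hlen ⊢; omega) _ rfl]
      rw [groups_eq (b :: t) (by simp), List.append_assoc]

-- ===== B: the in-chunk loop from index 1 on =====
theorem B_inner : ∀ (tail : List Int) (j : Nat), 1 ≤ j → j + tail.length ≤ 7 →
    ∀ (enc ws : List Int) (m : Int),
    (PySem.List.enumerate tail (j : Int)).foldl stepB (enc ++ m :: ws, enc.length)
      = (enc ++ msbAux tail j m :: (ws ++ tail.map (fun b => PySem.Int.band b 127)), enc.length) := by
  intro tail
  induction tail with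
  | nil => intro j _ _ enc ws m; simp [msbAux]
  | cons b t ih =>
    intro j hj hle enc ws m
    rw [PySem.List.enumerate_cons, List.foldl_cons]
    have hmod : PySem.Int.mod ((j : Nat) : Int) 7 = ((j : Nat) : Int) := by
      rw [PySem.Int.mod_eq_emod_of_pos (by norm_num : (0:Int) < 7)]
      have : j < 7 := by simp at hle; omega
      omega
    have hstep : stepB (enc ++ m :: ws, enc.length) (((j : Nat) : Int), b)
        = (enc ++ (if PySem.Int.band b 128 ≠ 0 then PySem.Int.bor m ((1 : Int) <<< j) else m)
            :: (ws ++ [PySem.Int.band b 127]), enc.length) := by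
      unfold stepB
      rw [hmod]
      have hne : ¬ (((j : Nat) : Int) = 0) := by omega
      simp only [if_neg hne, Int.toNat_natCast]
      split_ifs with hb
      · rw [getD_append_len, set_append_len]
        simp
      · simp
    rw [hstep]
    have h1 : ((j : Int) + 1) = ((j + 1 : Nat) : Int) := by push_cast; ring
    rw [h1, ih (j + 1) (by omega) (by simp only [List.length_cons] at hle ⊢; omega)]
    simp [msbAux]

-- ===== B: one whole group =====
theorem B_chunk (b : Int) (t rest : List Int) (enc : List Int) (c : Nat)
    (hle : (b :: t).length ≤ 7) :
    (PySem.List.enumerate ((b :: t) ++ rest) 0).foldl stepB (enc, c)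
      = (PySem.List.enumerate rest (((b :: t).length : Int))).foldl stepB
          (enc ++ (msbAux (b :: t) 0 0 :: (b :: t).map (fun x => PySem.Int.band x 127)), enc.length) := by
  rw [PySem.List.enumerate_append, List.foldl_append, zero_add]
  have hstep : stepB (enc, c) (0, b)
      = (enc ++ (if PySem.Int.band b 128 ≠ 0 then PySem.Int.bor 0 ((1 : Int) <<< (0 : Nat)) else 0)
          :: [PySem.Int.band b 127], enc.length) := by
    unfold stepB
    simp only [show PySem.Int.mod 0 7 = 0 from rfl, if_true]
    split_ifs with hb
    · rw [show enc ++ [(0 : Int)] = enc ++ (0 : Int) :: [] from rfl, getD_append_len, set_append_len]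
      simp
    · simp
  have hfirst : (PySem.List.enumerate (b :: t) 0).foldl stepB (enc, c)
      = (enc ++ msbAux (b :: t) 0 0 :: (b :: t).map (fun x => PySem.Int.band x 127), enc.length) := by
    rw [PySem.List.enumerate_cons, List.foldl_cons, hstep]
    have := B_inner t 1 le_rfl (by simp only [List.length_cons] at hle ⊢; omega) enc [PySem.Int.band b 127]
        (if PySem.Int.band b 128 ≠ 0 then PySem.Int.bor 0 ((1 : Int) <<< (0 : Nat)) else 0)
    rw [show ((1 : Nat) : Int) = (0 : Int) + 1 from by norm_num] at this
    rw [this]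
    simp [msbAux]
  rw [hfirst]

-- shifting the enumerate start by 7 does not change the B loop (it only reads i mod 7)
theorem B_shift : ∀ (rest : List Int) (k : Int) (s : List Int × Nat),
    (PySem.List.enumerate rest (k + 7)).foldl stepB s = (PySem.List.enumerate rest k).foldl stepB s := by
  intro rest
  induction rest with
  | nil => intro k s; rfl
  | cons b t ih =>
    intro k s
    rw [PySem.List.enumerate_cons, PySem.List.enumerate_cons, List.foldl_cons, List.foldl_cons]
    have hmod : PySem.Int.mod (k + 7) 7 = PySem.Int.mod k 7 := by
      rw [PySem.Int.mod_eq_emod_of_pos (by norm_num : (0:Int) < 7), PySem.Int.mod_eq_emod_of_pos (by norm_num : (0:Int) < 7)]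
      omega
    have hstep : stepB s (k + 7, b) = stepB s (k, b) := by
      unfold stepB
      rw [hmod]
    rw [hstep, show k + 7 + 1 = (k + 1) + 7 from by ring, ih]

-- ===== B equals groups =====
theorem B_main : ∀ (n : Nat) (data : List Int), data.length = n → ∀ (enc : List Int) (c : Nat),
    ((PySem.List.enumerate data 0).foldl stepB (enc, c)).1 = enc ++ groups data := by
  intro n
  induction n using Nat.strong_induction_on with
  | _ n ih =>
    intro data hlen enc c
    cases data with
    | nil => simp [groups]
    | cons b t =>
      by_cases h7 : (b :: t).length ≤ 7
      · have hrest : (b :: t).drop 7 = [] := by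
          simp only [List.length_cons] at h7
          simp
          omega
        have htake : (b :: t).take 7 = b :: t := by simp [List.take_of_length_le h7]
        rw [show (b :: t) = (b :: t) ++ [] from by simp, B_chunk b t [] enc c h7]
        simp [groups_eq (b :: t) (by simp), htake, hrest, groups]
      · have hsplit : (b :: t) = b :: t.take 6 ++ (b :: t).drop 7 := by
          rw [show b :: t.take 6 = (b :: t).take 7 from rfl]
          exact (List.take_append_drop 7 (b :: t)).symm
        have hlen7 : (b :: (t.take 6)).length = 7 := by
          simp only [List.length_cons] at h7
          simp
          omega
        conv_lhs => rw [hsplit]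
        rw [show (b :: t.take 6 ++ (b :: t).drop 7) = ((b :: t.take 6) ++ (b :: t).drop 7) from rfl]
        rw [B_chunk b (t.take 6) ((b :: t).drop 7) enc c (le_of_eq hlen7)]
        rw [hlen7, show ((7 : Nat) : Int) = (0 : Int) + 7 from by norm_num, B_shift]
        rw [ih ((b :: t).drop 7).length (by simp only [List.length_cons, List.length_drop] at hlen h7 ⊢; omega) _ rfl]
        rw [groups_eq (b :: t) (by simp), List.append_assoc]
        rw [show (b :: t).take 7 = b :: t.take 6 from rfl]

-- ===== VERDICT (by name: the statement is the Claim_ definition above) =====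
theorem midi7_encode_simple_spec : Claim_equal_midi7_encode_simple := by
  intro data _
  unfold Spec_midi7_encode_simple
  rw [A_unfold, B_unfold, A_main data.length data rfl [], B_main data.length data rfl [] 0]
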